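-- pv_equiv track=rewrite | github.com/AppliedIR/sift-mcp | packages/windows-triage/src/windows_triage/analysis/paths.py | is_system_path
-- ===== SOURCE A (Python) =====
-- _ENV_EXPANSIONS = {
--     "%windir%": r"\windows",
--     "%systemroot%": r"\windows",
--     "%programfiles%": r"\program files",
--     "%programfiles(x86)%": r"\program files (x86)",
--     "%programdata%": r"\programdata",
--     "%allusersprofile%": r"\programdata",  # maps to ProgramData on Vista+
--     "%systemdrive%": "",  # drive letter; leaves the rest of the path intact
--     "\\systemroot\\": "\\windows\\",
-- }
--
-- def normalize_path(path: str) -> str: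
--     r"""
--     Normalize a Windows path for database storage and lookup.
--
--     Transformations:
--     - Lowercase the entire path
--     - Expand environment-variable placeholders (%windir%,
--       %SystemRoot%, %ProgramFiles%, %ProgramFiles(x86)%, %ProgramData%,
--       %SystemDrive%, %AllUsersProfile%, and the \SystemRoot\ kernel
--       prefix). Must run BEFORE drive-letter strip so
--       %SystemDrive%\windows\... resolves correctly.
--     - Remove drive letter (C:\Windows -> \windows)
--     - Normalize separators (/ -> \)
--     - Remove trailing slashes
--
--     Pre-fix, registry values like `%windir%\system32\cmd.exe` matched
--     none of the baseline rows (which store `\windows\system32\...`),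
--     fell through to the filename-match fallback, and hit the
--     _MASQUERADE_TARGETS check — producing false SUSPICIOUS verdicts on
--     every Windows 10/11 autorun that uses unexpanded placeholders
--     (SecurityHealthSystray and friends). See
--     `specs/windows-triage-env-var-normalize-2026-04-24.md`.
--
--     Examples:
--         %windir%\System32\cmd.exe         -> \windows\system32\cmd.exe
--         %SystemRoot%\System32\cmd.exe     -> \windows\system32\cmd.exe
--         %ProgramFiles%\App\app.exe        -> \program files\app\app.exe
--         C:\Windows\System32\cmd.exe       -> \windows\system32\cmd.exe
--         c:\WINDOWS\system32\CMD.EXE       -> \windows\system32\cmd.exe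
--         C:/Users/Admin/file.txt           -> \users\admin\file.txt
--     """
--     if not path:
--         return path
--
--     # Lowercase first so env-var matching is case-insensitive.
--     path = path.lower()
--
--     # Env-var / system-path expansion. Runs before drive-strip so
--     # `%systemdrive%\windows\...` (placeholder produces "", leaving the
--     # trailing `\windows\...` intact) is handled correctly.
--     for placeholder, replacement in _ENV_EXPANSIONS.items():
--         if path.startswith(placeholder):
--             path = replacement + path[len(placeholder):]
--             break
--
--     # Remove drive letter (C:\Windows -> \windows)
--     if len(path) > 2 and path[1] == ":":
--         path = path[2:]
--
--     # Normalize separators (/ -> \)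
--     path = path.replace("/", "\\")
--
--     # Remove trailing slashes, but preserve root directory
--     stripped = path.rstrip("\\")
--     if not stripped:
--         # Path was just backslashes (root directory) - preserve single backslash
--         return "\\"
--
--     return stripped
--
-- SYSTEM_DIRECTORIES = [
--     "\\windows\\system32",
--     "\\windows\\syswow64",
--     "\\windows\\winsxs",
--     "\\windows",
--     "\\program files",
--     "\\program files (x86)",
-- ]
--
-- def is_system_path(path: str) -> bool:
--     """
--     Check if a path is in a Windows system directory.
--
--     Args:
--         path: Windows file path
--
--     Returns:
--         True if path is in a system directory
--     """
--     normalized = normalize_path(path)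
--     if not normalized:
--         return False
--     for sys_dir in SYSTEM_DIRECTORIES:
--         # Must match directory boundary: either exact match or followed by backslash
--         if normalized == sys_dir or normalized.startswith(sys_dir + "\\"):
--             return True
--     return False
-- ===== SOURCE B (Python) =====
-- _ENV_BY_PLACEHOLDER = {
--     "%windir%": "\\windows",
--     "%systemroot%": "\\windows",
--     "%programfiles%": "\\program files",
--     "%programfiles(x86)%": "\\program files (x86)",
--     "%programdata%": "\\programdata",
--     "%allusersprofile%": "\\programdata",
--     "%systemdrive%": "",
-- }
--
-- _SYSTEM_DIR_SET = frozenset([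
--     "\\windows\\system32",
--     "\\windows\\syswow64",
--     "\\windows\\winsxs",
--     "\\windows",
--     "\\program files",
--     "\\program files (x86)",
-- ])
--
--
-- def _expand(p):
--     """Expand a leading env-var placeholder by one dict lookup on the
--     head up to the closing percent sign (instead of scanning every placeholder)."""
--     if p.startswith("%"):
--         end = p.find("%", 1)
--         if end != -1:
--             rep = _ENV_BY_PLACEHOLDER.get(p[: end + 1])
--             if rep is not None:
--                 return rep + p[end + 1 :]
--     elif p.startswith("\\systemroot\\"):
--         return "\\windows\\" + p[len("\\systemroot\\") :]
--     return p
--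
--
-- def is_system_path(path: str) -> bool:
--     """Check if a path is in a Windows system directory.
--
--     Single pass over the path's own characters: at every separator the
--     cumulative separator-normalized prefix is looked up in a set of the
--     system directories, which also subsumes the separator-replace,
--     trailing-slash-strip and root-preserve passes of the
--     normalize-then-scan approach.
--     """
--     p = _expand(path.lower())
--     if len(p) > 2 and p[1] == ":":
--         p = p[2:]
--     prefix = ""
--     for ch in p:
--         if ch == "\\" or ch == "/":
--             if prefix in _SYSTEM_DIR_SET:
--                 return True
--             prefix += "\\"
--         else:
--             prefix += ch
--     return prefix in _SYSTEM_DIR_SET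
-- ===== Notes on version B (the rewrite author's own statement) =====
-- stated objective: alternative
-- what changed: A normalizes in staged passes (scan all env placeholders with startswith, strip drive, replace separators, rstrip slashes, preserve root) and then scans the fixed directory list testing the normalized path with startswith; B expands the placeholder by a single dict lookup keyed on the head up to the closing percent sign and then makes one pass over the path's own characters, checking the cumulative separator-normalized prefix against a set of the system directories at each separator, which subsumes the replace/rstrip/root passes and the directory scan.
import Mathlib
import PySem

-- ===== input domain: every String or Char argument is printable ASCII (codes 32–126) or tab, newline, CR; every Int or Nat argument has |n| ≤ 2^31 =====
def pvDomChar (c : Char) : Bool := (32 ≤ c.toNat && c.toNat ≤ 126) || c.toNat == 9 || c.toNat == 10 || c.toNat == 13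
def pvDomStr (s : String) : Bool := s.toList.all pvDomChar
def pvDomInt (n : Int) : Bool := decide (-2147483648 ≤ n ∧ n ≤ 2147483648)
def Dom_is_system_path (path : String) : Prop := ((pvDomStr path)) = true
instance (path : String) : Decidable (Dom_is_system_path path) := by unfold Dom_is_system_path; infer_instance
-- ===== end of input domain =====

-- B replaces A's normalize-then-scan (expand by scanning all placeholders, strip drive, replace
-- separators, rstrip, then test the result against each directory with startswith) by one dict
-- lookup keyed on the head up to the closing percent sign plus a single pass over the path's own
-- characters checking the cumulative prefix in a set at each separator; same value, alternative structure.

-- ===== PORT A =====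
def pvEnvExpansions : List (List Char × List Char) :=
  [("%windir%".toList, "\\windows".toList),
   ("%systemroot%".toList, "\\windows".toList),
   ("%programfiles%".toList, "\\program files".toList),
   ("%programfiles(x86)%".toList, "\\program files (x86)".toList),
   ("%programdata%".toList, "\\programdata".toList),
   ("%allusersprofile%".toList, "\\programdata".toList),
   ("%systemdrive%".toList, [] ),
   ("\\systemroot\\".toList, "\\windows\\".toList)]

-- the for-loop over _ENV_EXPANSIONS.items() with break: first matching placeholder is expanded
def pvExpandEnv : List (List Char × List Char) → List Char → List Char
  | [], p => p
  | (ph, rep) :: rest, p =>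
    if PySem.Chars.startswith p ph then
      rep ++ PySem.Chars.slice p (some (ph.length : Int)) none   -- replacement + path[len(placeholder):]
    else pvExpandEnv rest p

def pvNormalizePath (path : List Char) : List Char :=
  if path = [] then path
  else
    let path := PySem.Chars.lower path
    let path := pvExpandEnv pvEnvExpansions path
    let path := if 2 < path.length && path[1]? == some ':' then path.drop 2 else path
    let path := PySem.Chars.replace path ['/'] ['\\']
    -- path.rstrip("\\"), ported by hand (PySem has no rstrip-with-chars): drop trailing '\'s — exact
    let stripped := (path.reverse.dropWhile (· == '\\')).reverse
    if stripped = [] then ['\\'] else stripped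

def pvSystemDirectories : List (List Char) :=
  ["\\windows\\system32".toList, "\\windows\\syswow64".toList, "\\windows\\winsxs".toList,
   "\\windows".toList, "\\program files".toList, "\\program files (x86)".toList]

-- A's loop over SYSTEM_DIRECTORIES with early return
def pvLoopA : List (List Char) → List Char → Bool
  | [], _ => false
  | d :: ds, n =>
    if n == d || PySem.Chars.startswith n (d ++ ['\\']) then true
    else pvLoopA ds n

def is_system_path (path : String) : Bool :=
  let normalized := pvNormalizePath path.toList
  if normalized = [] then false
  else pvLoopA pvSystemDirectories normalized

-- ===== PORT B =====
def pvEnvByPlaceholder : PySem.Dict (List Char) (List Char) :=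
  PySem.Dict.ofList
  [("%windir%".toList, "\\windows".toList),
   ("%systemroot%".toList, "\\windows".toList),
   ("%programfiles%".toList, "\\program files".toList),
   ("%programfiles(x86)%".toList, "\\program files (x86)".toList),
   ("%programdata%".toList, "\\programdata".toList),
   ("%allusersprofile%".toList, "\\programdata".toList),
   ("%systemdrive%".toList, [] )]

def pvSystemDirSet : PySem.Set (List Char) :=
  PySem.Set.ofList
    ["\\windows\\system32".toList, "\\windows\\syswow64".toList, "\\windows\\winsxs".toList,
     "\\windows".toList, "\\program files".toList, "\\program files (x86)".toList]

-- _expand: one dict lookup keyed by the '%'-delimited head, instead of scanning every placeholder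
def pvExpandB (p : List Char) : List Char :=
  if PySem.Chars.startswith p ['%'] then
    let e := PySem.Chars.findFrom p ['%'] 1 none
    if e ≠ -1 then
      match PySem.Dict.get? pvEnvByPlaceholder (PySem.Chars.slice p none (some (e + 1))) with
      | some rep => rep ++ PySem.Chars.slice p (some (e + 1)) none
      | none => p
    else p
  else if PySem.Chars.startswith p "\\systemroot\\".toList then
    "\\windows\\".toList ++ PySem.Chars.slice p (some (12 : Int)) none
  else p

-- the for-loop over the path's characters, accumulating the separator-normalized prefix
def pvWalk (pre : List Char) : List Char → Bool
  | [] => PySem.Set.contains pvSystemDirSet pre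
  | c :: rest =>
    if c == '\\' || c == '/' then
      if PySem.Set.contains pvSystemDirSet pre then true
      else pvWalk (pre ++ ['\\']) rest
    else pvWalk (pre ++ [c]) rest

def is_system_path_alt (path : String) : Bool :=
  let p := pvExpandB (PySem.Chars.lower path.toList)
  let p := if 2 < p.length && p[1]? == some ':' then p.drop 2 else p
  pvWalk [] p

-- ===== PRECONDITION & SPEC =====
def Spec_is_system_path (path : String) (out : Bool) : Prop := out = is_system_path_alt path
instance (path : String) (out : Bool) : Decidable (Spec_is_system_path path out) := by unfold Spec_is_system_path; infer_instance

-- ===== CLAIM (what is proved, stated in full; the proofs are below) =====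
def Claim_equal_is_system_path : Prop := ∀ (path : String), Dom_is_system_path path → Spec_is_system_path path (is_system_path path)

-- ===== LEMMAS AND PROOFS =====

-- separator normalization as a per-character function (proof-only helper)
def pvNorm (c : Char) : Char := if c = '/' then '\\' else c

-- str.replace with a one-char pattern is a character map

lemma replace_go_map : ∀ (fuel : Nat) (l acc : List Char), l.length ≤ fuel →
    PySem.Chars.replace.go ['/'] ['\\'] fuel l acc = acc.reverse ++ l.map pvNorm := by
  intro fuel
  induction fuel with
  | zero => intro l acc h; have : l = [] := by cases l <;> simp_all
            simp [this, PySem.Chars.replace.go]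
  | succ n ih =>
    intro l acc h
    cases l with
    | nil => simp [PySem.Chars.replace.go]
    | cons c t =>
      simp only [PySem.Chars.replace.go]
      by_cases hc : c = '/'
      · subst hc
        have hp : List.isPrefixOf ['/'] ('/' :: t) = true := by simp [List.isPrefixOf]
        rw [if_pos hp]
        simp only [show (['/'] : List Char).length = 1 from rfl, List.drop_succ_cons,
          List.drop_zero]
        rw [show (['\\'] : List Char).reverse ++ acc = '\\' :: acc from rfl]
        rw [ih t ('\\' :: acc) (by simpa using h)]
        simp [pvNorm]
      · have hp : List.isPrefixOf ['/'] (c :: t) = false := by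
          simp [List.isPrefixOf]; exact fun h' => hc h'.symm
        rw [if_neg (by simp [hp])]
        rw [ih t (c :: acc) (by simpa using h)]
        simp [pvNorm, hc]

lemma replace_eq_map (s : List Char) :
    PySem.Chars.replace s ['/'] ['\\'] = s.map pvNorm := by
  rw [PySem.Chars.replace]
  simp [replace_go_map s.length s [] (le_refl _)]

-- membership in B's set is membership in A's directory list
lemma memSet_iff (x : List Char) :
    PySem.Set.contains pvSystemDirSet x = true ↔ x ∈ pvSystemDirectories := by
  simp [pvSystemDirSet, PySem.Set.contains, PySem.Set.mem_ofList, pvSystemDirectories]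

-- characterization of A's loop: some directory matches exactly or at a backslash boundary
lemma loopA_iff (ds : List (List Char)) (n : List Char) :
    pvLoopA ds n = true ↔ ∃ d ∈ ds, n = d ∨ (d ++ ['\\']) <+: n := by
  induction ds with
  | nil => simp [pvLoopA]
  | cons d ds ih =>
    simp only [pvLoopA]
    split
    · rename_i h
      simp only [Bool.or_eq_true, beq_iff_eq, PySem.Chars.startswith_iff] at h
      simpa using Or.inl h
    · rename_i h
      simp only [Bool.or_eq_true, beq_iff_eq, PySem.Chars.startswith_iff] at h
      push Not at h
      rw [ih]
      constructor
      · rintro ⟨e, he, hc⟩; exact ⟨e, by simp [he], hc⟩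
      · rintro ⟨e, he, hc⟩
        rcases List.mem_cons.mp he with rfl | he'
        · rcases hc with hc | hc
          · exact absurd hc h.1
          · exact absurd hc h.2
        · exact ⟨e, he', hc⟩

-- characterization of B's walk
lemma walk_iff (s : List Char) : ∀ (pre : List Char),
    pvWalk pre s = true ↔
      ∃ p q, s = p ++ q ∧ (q = [] ∨ ∃ c r, q = c :: r ∧ (c = '\\' ∨ c = '/')) ∧
        (pre ++ p.map pvNorm) ∈ pvSystemDirectories := by
  induction s with
  | nil =>
    intro pre
    simp only [pvWalk, memSet_iff]
    constructor
    · intro h; exact ⟨[], [], by simp, Or.inl rfl, by simpa using h⟩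
    · rintro ⟨p, q, hpq, _, hm⟩
      have hp : p = [] := (List.append_eq_nil_iff.mp hpq.symm).1
      subst hp; simpa using hm
  | cons c rest ih =>
    intro pre
    simp only [pvWalk]
    by_cases hsep : c = '\\' ∨ c = '/'
    · rw [if_pos (by rcases hsep with h | h <;> simp [h])]
      have hnc : pvNorm c = '\\' := by rcases hsep with h | h <;> simp [pvNorm, h]
      by_cases hin : PySem.Set.contains pvSystemDirSet pre = true
      · rw [if_pos hin]
        simp only [true_iff]
        exact ⟨[], c :: rest, by simp, Or.inr ⟨c, rest, rfl, hsep⟩, by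
          simpa using (memSet_iff pre).mp hin⟩
      · rw [if_neg hin, ih]
        constructor
        · rintro ⟨p, q, hpq, hb, hm⟩
          exact ⟨c :: p, q, by simp [hpq], hb, by
            simpa [hnc, List.append_assoc] using hm⟩
        · rintro ⟨p, q, hpq, hb, hm⟩
          cases p with
          | nil =>
            exact absurd ((memSet_iff pre).mpr (by simpa using hm)) hin
          | cons c' p' =>
            have hc : c = c' ∧ rest = p' ++ q := by simpa using hpq
            exact ⟨p', q, hc.2, hb, by
              simpa [← hc.1, hnc, List.append_assoc] using hm⟩
    · rw [if_neg (by rcases not_or.mp hsep with ⟨h1, h2⟩; simp [h1, h2])]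
      have hnc : pvNorm c = c := by
        rcases not_or.mp hsep with ⟨_, h2⟩; simp [pvNorm, h2]
      rw [ih]
      constructor
      · rintro ⟨p, q, hpq, hb, hm⟩
        exact ⟨c :: p, q, by simp [hpq], hb, by simpa [hnc, List.append_assoc] using hm⟩
      · rintro ⟨p, q, hpq, hb, hm⟩
        cases p with
        | nil =>
          exfalso
          rcases hb with rfl | ⟨c', r, hq, hc'⟩
          · simp at hpq
          · rw [hq] at hpq
            have hcc : c = c' := by
              have := congrArg List.head? hpq; simpa using this
            exact hsep (hcc ▸ hc')
        | cons c' p' =>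
          have hc : c = c' ∧ rest = p' ++ q := by simpa using hpq
          exact ⟨p', q, hc.2, hb, by simpa [← hc.1, hnc, List.append_assoc] using hm⟩

-- the mid-level property both sides are reduced to, stated on the separator-normalized string
def pvMid (m : List Char) : Prop :=
  ∃ p q, m = p ++ q ∧ (q = [] ∨ ∃ r, q = '\\' :: r) ∧ p ∈ pvSystemDirectories

lemma walk_iff_mid (s : List Char) : pvWalk [] s = true ↔ pvMid (s.map pvNorm) := by
  rw [walk_iff s []]
  constructor
  · rintro ⟨p, q, rfl, hb, hm⟩
    refine ⟨p.map pvNorm, q.map pvNorm, by simp, ?_, by simpa using hm⟩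
    rcases hb with rfl | ⟨c, r, rfl, hsep⟩
    · exact Or.inl (by simp)
    · refine Or.inr ⟨r.map pvNorm, ?_⟩
      have : pvNorm c = '\\' := by rcases hsep with h | h <;> simp [pvNorm, h]
      simp [this]
  · rintro ⟨p', q', hpq, hb, hm⟩
    refine ⟨s.take p'.length, s.drop p'.length, (List.take_append_drop _ s).symm, ?_, ?_⟩
    · have hq : (s.drop p'.length).map pvNorm = q' := by
        have := congrArg (List.drop p'.length) hpq
        simpa [List.map_drop] using this
      rcases hb with rfl | ⟨r, rfl⟩
      · exact Or.inl (by simpa using hq)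
      · cases hd : s.drop p'.length with
        | nil => rw [hd] at hq; simp at hq
        | cons c r₀ =>
          rw [hd] at hq
          have hc : pvNorm c = '\\' := by simpa using congrArg List.head? hq
          refine Or.inr ⟨c, r₀, rfl, ?_⟩
          by_cases h : c = '/'
          · exact Or.inr h
          · left; simpa [pvNorm, h] using hc
    · have hp : (s.take p'.length).map pvNorm = p' := by
        have := congrArg (List.take p'.length) hpq
        simpa [List.map_take] using this
      simpa [hp] using hm

-- A's replace+rstrip+root-preserve+scan is the same mid-level property
lemma loopA_rstrip_iff_mid (m : List Char) :
    (let t := (m.reverse.dropWhile (· == '\\')).reverse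
     pvLoopA pvSystemDirectories (if t = [] then ['\\'] else t)) = true ↔ pvMid m := by
  set t := (m.reverse.dropWhile (· == '\\')).reverse with ht_def
  set u := (m.reverse.takeWhile (· == '\\')).reverse with hu_def
  have hm : m = t ++ u := by
    rw [ht_def, hu_def, ← List.reverse_append, List.takeWhile_append_dropWhile,
      List.reverse_reverse]
  have hu : ∀ c ∈ u, c = '\\' := by
    intro c hc
    have := List.mem_takeWhile_imp (List.mem_reverse.mp hc)
    simpa using this
  show pvLoopA pvSystemDirectories (if t = [] then ['\\'] else t) = true ↔ pvMid m
  by_cases ht : t = []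
  · rw [if_pos ht]
    have hlhs : pvLoopA pvSystemDirectories ['\\'] = false := by decide
    rw [hlhs]
    simp only [Bool.false_eq_true, false_iff]
    rintro ⟨p, q, hm2, hb, hmem⟩
    have hallm : ∀ c ∈ m, c = '\\' := by
      intro c hc; exact hu c (by rwa [hm, ht, List.nil_append] at hc)
    have hallp : ∀ c ∈ p, c = '\\' := fun c hc => hallm c (hm2 ▸ List.mem_append_left q hc)
    have hmem' : p = "\\windows\\system32".toList ∨ p = "\\windows\\syswow64".toList ∨
        p = "\\windows\\winsxs".toList ∨ p = "\\windows".toList ∨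
        p = "\\program files".toList ∨ p = "\\program files (x86)".toList := by
      simpa [pvSystemDirectories] using hmem
    rcases hmem' with rfl | rfl | rfl | rfl | rfl | rfl
    · exact absurd (hallp 'w' (by decide)) (by decide)
    · exact absurd (hallp 'w' (by decide)) (by decide)
    · exact absurd (hallp 'w' (by decide)) (by decide)
    · exact absurd (hallp 'w' (by decide)) (by decide)
    · exact absurd (hallp 'p' (by decide)) (by decide)
    · exact absurd (hallp 'p' (by decide)) (by decide)
  · rw [if_neg ht, loopA_iff]
    constructor
    · rintro ⟨d, hd, heq | ⟨r', hr⟩⟩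
      · refine ⟨d, u, by rw [hm, heq], ?_, hd⟩
        cases hcu : u with
        | nil => exact Or.inl rfl
        | cons c r =>
          have : c = '\\' := hu c (by rw [hcu]; exact List.mem_cons_self)
          exact Or.inr ⟨r, by rw [this]⟩
      · exact ⟨d, '\\' :: (r' ++ u), by rw [hm, ← hr]; simp, Or.inr ⟨r' ++ u, rfl⟩, hd⟩
    · rintro ⟨p, q, hm2, hb, hmem⟩
      have hpm : p <+: m := ⟨q, hm2.symm⟩
      have htm : t <+: m := ⟨u, hm.symm⟩
      have hplast : p.getLast? ≠ some '\\' := by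
        have hmem' : p = "\\windows\\system32".toList ∨ p = "\\windows\\syswow64".toList ∨
            p = "\\windows\\winsxs".toList ∨ p = "\\windows".toList ∨
            p = "\\program files".toList ∨ p = "\\program files (x86)".toList := by
          simpa [pvSystemDirectories] using hmem
        rcases hmem' with rfl | rfl | rfl | rfl | rfl | rfl <;> decide
      by_cases hlen : p.length ≤ t.length
      · have hpt : p <+: t := List.prefix_of_prefix_length_le hpm htm hlen
        rcases Nat.lt_or_ge p.length t.length with hlt | hge
        · -- strict prefix: the boundary character is inside t
          have hq : q ≠ [] := by
            rintro rfl
            rw [List.append_nil] at hm2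
            rw [← hm2] at hlt
            have := List.IsPrefix.length_le htm
            omega
          rcases hb with rfl | ⟨r, rfl⟩
          · exact absurd rfl hq
          · refine ⟨p, hmem, Or.inr ?_⟩
            have hpbm : p ++ ['\\'] <+: m := ⟨r, by rw [hm2]; simp⟩
            exact List.prefix_of_prefix_length_le hpbm htm (by simp; omega)
        · have : p = t := hpt.eq_of_length (le_antisymm hlen hge)
          exact ⟨p, hmem, Or.inl this.symm⟩
      · exfalso
        have htp : t <+: p := List.prefix_of_prefix_length_le htm hpm (by omega)
        obtain ⟨w, hw⟩ := htp
        have hwu : w <+: u := by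
          rw [← hw] at hpm
          rw [hm] at hpm
          exact (List.prefix_append_right_inj t).mp hpm
        have hwne : w ≠ [] := by
          rintro rfl
          rw [List.append_nil] at hw
          rw [← hw] at hlen
          exact hlen (le_refl _)
        have hlast : p.getLast? = w.getLast? := by
          rw [← hw]; exact List.getLast?_append_of_ne_nil t hwne
        have : w.getLast? = some '\\' := by
          cases hwl : w.getLast? with
          | none => exact absurd (List.getLast?_eq_none_iff.mp hwl) hwne
          | some c =>
            have hcw : c ∈ w := List.mem_of_getLast? hwl
            rw [hu c (hwu.subset hcw)]
        exact hplast (hlast ▸ this)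

-- where the first '%' of a string with a known decomposition sits
lemma find_pct (mid rest : List Char) (hmid : '%' ∉ mid) :
    PySem.Chars.find (mid ++ '%' :: rest) ['%'] = (mid.length : Int) := by
  have hinf : ['%'] <:+: (mid ++ '%' :: rest) := ⟨mid, rest, by simp⟩
  have h0 : 0 ≤ PySem.Chars.find (mid ++ '%' :: rest) ['%'] :=
    (PySem.Chars.find_nonneg_iff _ _).mpr hinf
  obtain ⟨hpre, hmin⟩ := PySem.Chars.find_spec h0
  set i := (PySem.Chars.find (mid ++ '%' :: rest) ['%']).toNat with hi
  have hle : i ≤ mid.length := by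
    by_contra hgt
    exact hmin mid.length (by omega) (by
      rw [List.drop_left]; exact ⟨rest, rfl⟩)
  have hge : ¬ i < mid.length := by
    intro hlt
    have hget : (mid ++ '%' :: rest)[i]? = some '%' := by
      obtain ⟨r, hr⟩ := hpre
      have : (mid ++ '%' :: rest).drop i = '%' :: r := by simpa using hr.symm
      have := congrArg List.head? this
      rwa [List.head?_drop] at this
    rw [List.getElem?_append_left hlt] at hget
    exact hmid (List.mem_of_getElem? hget)
  have : i = mid.length := by omega
  omega

-- B's _expand on a string starting with a '%'-delimited head
lemma expandB_eq (mid rest : List Char) (hmid : '%' ∉ mid) :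
    pvExpandB ('%' :: (mid ++ '%' :: rest)) =
      match PySem.Dict.get? pvEnvByPlaceholder ('%' :: (mid ++ ['%'])) with
      | some rep => rep ++ rest
      | none => '%' :: (mid ++ '%' :: rest) := by
  have hps : PySem.Chars.startswith ('%' :: (mid ++ '%' :: rest)) ['%'] = true := by
    rw [PySem.Chars.startswith_iff]; exact ⟨mid ++ '%' :: rest, rfl⟩
  have he : PySem.Chars.findFrom ('%' :: (mid ++ '%' :: rest)) ['%'] 1 none
      = 1 + (mid.length : Int) := by
    rw [show (1 : Int) = ((1 : Nat) : Int) from rfl,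
      PySem.Chars.findFrom_natCast _ ['%'] 1 (by simp)]
    rw [show ('%' :: (mid ++ '%' :: rest)).drop 1 = mid ++ '%' :: rest from rfl]
    rw [find_pct mid rest hmid]
    rw [if_neg (by omega)]
  have hc1 : PySem.Chars.slice ('%' :: (mid ++ '%' :: rest)) none
      (some (1 + (mid.length : Int) + 1)) = '%' :: (mid ++ ['%']) := by
    rw [PySem.Chars.slice_eq_listSlice, PySem.List.slice_to _ (by omega)]
    rw [show (1 + (mid.length : Int) + 1).toNat = mid.length + 2 by omega]
    rw [show ('%' :: (mid ++ '%' :: rest)).take (mid.length + 2)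
        = '%' :: (mid ++ '%' :: rest).take (mid.length + 1) from rfl]
    rw [List.take_append]
    simp
  have hc2 : PySem.Chars.slice ('%' :: (mid ++ '%' :: rest))
      (some (1 + (mid.length : Int) + 1)) none = rest := by
    rw [PySem.Chars.slice_eq_listSlice, PySem.List.slice_from _ (by omega)]
    rw [show (1 + (mid.length : Int) + 1).toNat = mid.length + 2 by omega]
    rw [show ('%' :: (mid ++ '%' :: rest)).drop (mid.length + 2)
        = (mid ++ '%' :: rest).drop (mid.length + 1) from rfl]
    rw [List.drop_append]
    simp
  unfold pvExpandB
  rw [if_pos hps]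
  simp only [he, hc1, hc2]
  rw [if_pos (show (1 + (mid.length : Int)) ≠ -1 by omega)]

-- the two expansion steps agree on every string
-- one positive placeholder case: A's branch value equals B's branch value
lemma expandA_key (ph rep : List Char) (rest : List Char) :
    rep ++ PySem.Chars.slice (ph ++ rest) (some (ph.length : Int)) none = rep ++ rest := by
  rw [PySem.Chars.slice_eq_listSlice, PySem.List.slice_from_natCast, List.drop_left]

lemma expand_agree (p : List Char) : pvExpandEnv pvEnvExpansions p = pvExpandB p := by
  by_cases h1 : PySem.Chars.startswith p "%windir%".toList = true
  · obtain ⟨rest, hrest⟩ := (PySem.Chars.startswith_iff _ _).mp h1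
    subst hrest
    simp only [pvEnvExpansions, pvExpandEnv]
    rw [if_pos h1, expandA_key]
    rw [show "%windir%".toList ++ rest = '%' :: ("windir".toList ++ '%' :: rest) from rfl]
    rw [expandB_eq "windir".toList rest (by decide)]
    rfl
  by_cases h2 : PySem.Chars.startswith p "%systemroot%".toList = true
  · obtain ⟨rest, hrest⟩ := (PySem.Chars.startswith_iff _ _).mp h2
    subst hrest
    simp only [pvEnvExpansions, pvExpandEnv]
    rw [if_neg h1, if_pos h2, expandA_key]
    rw [show "%systemroot%".toList ++ rest = '%' :: ("systemroot".toList ++ '%' :: rest) from rfl]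
    rw [expandB_eq "systemroot".toList rest (by decide)]
    rfl
  by_cases h3 : PySem.Chars.startswith p "%programfiles%".toList = true
  · obtain ⟨rest, hrest⟩ := (PySem.Chars.startswith_iff _ _).mp h3
    subst hrest
    simp only [pvEnvExpansions, pvExpandEnv]
    rw [if_neg h1, if_neg h2, if_pos h3, expandA_key]
    rw [show "%programfiles%".toList ++ rest
        = '%' :: ("programfiles".toList ++ '%' :: rest) from rfl]
    rw [expandB_eq "programfiles".toList rest (by decide)]
    rfl
  by_cases h4 : PySem.Chars.startswith p "%programfiles(x86)%".toList = true
  · obtain ⟨rest, hrest⟩ := (PySem.Chars.startswith_iff _ _).mp h4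
    subst hrest
    simp only [pvEnvExpansions, pvExpandEnv]
    rw [if_neg h1, if_neg h2, if_neg h3, if_pos h4, expandA_key]
    rw [show "%programfiles(x86)%".toList ++ rest
        = '%' :: ("programfiles(x86)".toList ++ '%' :: rest) from rfl]
    rw [expandB_eq "programfiles(x86)".toList rest (by decide)]
    rfl
  by_cases h5 : PySem.Chars.startswith p "%programdata%".toList = true
  · obtain ⟨rest, hrest⟩ := (PySem.Chars.startswith_iff _ _).mp h5
    subst hrest
    simp only [pvEnvExpansions, pvExpandEnv]
    rw [if_neg h1, if_neg h2, if_neg h3, if_neg h4, if_pos h5, expandA_key]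
    rw [show "%programdata%".toList ++ rest
        = '%' :: ("programdata".toList ++ '%' :: rest) from rfl]
    rw [expandB_eq "programdata".toList rest (by decide)]
    rfl
  by_cases h6 : PySem.Chars.startswith p "%allusersprofile%".toList = true
  · obtain ⟨rest, hrest⟩ := (PySem.Chars.startswith_iff _ _).mp h6
    subst hrest
    simp only [pvEnvExpansions, pvExpandEnv]
    rw [if_neg h1, if_neg h2, if_neg h3, if_neg h4, if_neg h5, if_pos h6, expandA_key]
    rw [show "%allusersprofile%".toList ++ rest
        = '%' :: ("allusersprofile".toList ++ '%' :: rest) from rfl]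
    rw [expandB_eq "allusersprofile".toList rest (by decide)]
    rfl
  by_cases h7 : PySem.Chars.startswith p "%systemdrive%".toList = true
  · obtain ⟨rest, hrest⟩ := (PySem.Chars.startswith_iff _ _).mp h7
    subst hrest
    simp only [pvEnvExpansions, pvExpandEnv]
    rw [if_neg h1, if_neg h2, if_neg h3, if_neg h4, if_neg h5, if_neg h6, if_pos h7, expandA_key]
    rw [show "%systemdrive%".toList ++ rest
        = '%' :: ("systemdrive".toList ++ '%' :: rest) from rfl]
    rw [expandB_eq "systemdrive".toList rest (by decide)]
    rfl
  by_cases h8 : PySem.Chars.startswith p "\\systemroot\\".toList = true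
  · obtain ⟨rest, hrest⟩ := (PySem.Chars.startswith_iff _ _).mp h8
    subst hrest
    simp only [pvEnvExpansions, pvExpandEnv]
    rw [if_neg h1, if_neg h2, if_neg h3, if_neg h4, if_neg h5, if_neg h6, if_neg h7, if_pos h8]
    unfold pvExpandB
    rw [if_neg (by rw [PySem.Chars.startswith_iff]; rintro ⟨t, ht⟩; simp at ht)]
    rw [if_pos h8]
    rfl
  · -- no placeholder matches: both sides leave the path unchanged
    have hA : pvExpandEnv pvEnvExpansions p = p := by
      simp only [pvEnvExpansions, pvExpandEnv]
      rw [if_neg h1, if_neg h2, if_neg h3, if_neg h4, if_neg h5, if_neg h6, if_neg h7, if_neg h8]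
    rw [hA]
    by_cases hp : PySem.Chars.startswith p ['%'] = true
    · obtain ⟨t, ht⟩ := (PySem.Chars.startswith_iff _ _).mp hp
      subst ht
      simp only [List.singleton_append] at h1 h2 h3 h4 h5 h6 h7 h8 hA hp ⊢
      unfold pvExpandB
      rw [if_pos hp]
      set i := PySem.Chars.find t ['%'] with hi
      have hff : PySem.Chars.findFrom ('%' :: t) ['%'] 1 none
          = if i = -1 then -1 else 1 + i := by
        rw [show (1 : Int) = ((1 : Nat) : Int) from rfl,
          PySem.Chars.findFrom_natCast _ _ 1 (by simp)]
        rfl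
      by_cases hneg : i = -1
      · simp [hff, hneg]
      · have hnn : 0 ≤ i := by have := PySem.Chars.neg_one_le_find t ['%']; omega
        simp only [hff, if_neg hneg]
        rw [if_pos (show (1 + i : Int) ≠ -1 by omega)]
        have hcand : ∀ v, PySem.Dict.get? pvEnvByPlaceholder
            (PySem.Chars.slice ('%' :: t) none (some (1 + i + 1))) = some v → False := by
          intro v hv
          have hpre : PySem.Chars.slice ('%' :: t) none (some (1 + i + 1)) <+: ('%' :: t) := by
            rw [PySem.Chars.slice_eq_listSlice, PySem.List.slice_to _ (by omega)]
            exact List.take_prefix _ _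
          unfold PySem.Dict.get? at hv
          obtain ⟨pair, hfind, -⟩ := Option.map_eq_some_iff.mp hv
          have hmem := List.mem_of_find?_eq_some hfind
          have hkey : pair.1 = PySem.Chars.slice ('%' :: t) none (some (1 + i + 1)) := by
            have := List.find?_some hfind
            simpa using this
          rw [show pvEnvByPlaceholder.items
              = [("%windir%".toList, "\\windows".toList),
                 ("%systemroot%".toList, "\\windows".toList),
                 ("%programfiles%".toList, "\\program files".toList),
                 ("%programfiles(x86)%".toList, "\\program files (x86)".toList),
                 ("%programdata%".toList, "\\programdata".toList),
                 ("%allusersprofile%".toList, "\\programdata".toList),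
                 ("%systemdrive%".toList, [])] from by decide] at hmem
          obtain ⟨k, vv⟩ := pair
          simp only at hkey
          rw [← hkey] at hpre
          simp only [List.mem_cons, List.not_mem_nil, or_false, Prod.mk.injEq] at hmem
          rcases hmem with ⟨hk, -⟩ | ⟨hk, -⟩ | ⟨hk, -⟩ | ⟨hk, -⟩ | ⟨hk, -⟩ | ⟨hk, -⟩ | ⟨hk, -⟩ <;>
            rw [hk] at hpre
          · exact h1 ((PySem.Chars.startswith_iff _ _).mpr hpre)
          · exact h2 ((PySem.Chars.startswith_iff _ _).mpr hpre)
          · exact h3 ((PySem.Chars.startswith_iff _ _).mpr hpre)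
          · exact h4 ((PySem.Chars.startswith_iff _ _).mpr hpre)
          · exact h5 ((PySem.Chars.startswith_iff _ _).mpr hpre)
          · exact h6 ((PySem.Chars.startswith_iff _ _).mpr hpre)
          · exact h7 ((PySem.Chars.startswith_iff _ _).mpr hpre)
        cases hget : PySem.Dict.get? pvEnvByPlaceholder
            (PySem.Chars.slice ('%' :: t) none (some (1 + i + 1))) with
        | none => rfl
        | some v => exact (hcand v hget).elim
    · unfold pvExpandB
      rw [if_neg hp, if_neg h8]

-- A's replace / rstrip / root-preserve / scan tail equals B's walk, for any expanded+drive-stripped path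
lemma pipeline_eq (v : List Char) :
    (let m := PySem.Chars.replace v ['/'] ['\\']
     let stripped := (m.reverse.dropWhile (· == '\\')).reverse
     let normalized := if stripped = [] then ['\\'] else stripped
     if normalized = [] then false else pvLoopA pvSystemDirectories normalized) = pvWalk [] v := by
  set m := PySem.Chars.replace v ['/'] ['\\'] with hm
  set t := (m.reverse.dropWhile (· == '\\')).reverse with ht
  show (if (if t = [] then ['\\'] else t) = [] then false
        else pvLoopA pvSystemDirectories (if t = [] then ['\\'] else t)) = pvWalk [] v
  have hne : (if t = [] then ['\\'] else t) ≠ [] := by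
    split_ifs with h
    · simp
    · exact h
  rw [if_neg hne]
  have hA := loopA_rstrip_iff_mid m
  have hB := walk_iff_mid v
  rw [show v.map pvNorm = m from (replace_eq_map v).symm] at hB
  refine Bool.eq_iff_iff.mpr ?_
  exact hA.trans hB.symm

-- ===== VERDICT (by name: the statement is the Claim_ definition above) =====
theorem is_system_path_spec : Claim_equal_is_system_path := by
  intro path _
  unfold Spec_is_system_path is_system_path is_system_path_alt
  by_cases hnil : path.toList = []
  · rw [hnil]; decide
  · unfold pvNormalizePath
    rw [if_neg hnil]
    simp only [expand_agree]
    exact pipeline_eq _
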